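-- pv_equiv track=rewrite | github.com/haron68/prime_numbers_stuff | pyplot_prime_gaps.py | formalizeFile
-- ===== SOURCE A (Python) =====
-- def formalizeFile(file, endDigitLength):
--     gap = ' '
--     strGap = '{}'.format(gap * endDigitLength)
--     file = file.replace(strGap, ',')
--
--     if endDigitLength == 1:
--         file = file.replace('\n', '')
--         file = file.split(',')
--         return file
--     else:
--         return formalizeFile(file, endDigitLength - 1)
-- ===== SOURCE B (Python) =====
-- def formalizeFile(file, endDigitLength):
--     for k in range(endDigitLength, 0, -1):
--         file = file.replace(' ' * k, ',')
--     file = file.replace('\n', '')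
--     return file.split(',')
-- ===== Notes on version B (the rewrite author's own statement) =====
-- stated objective: simpler
-- what changed: Replaces A's tail recursion (endDigitLength counted down by re-calling the function) with a single explicit loop over k = endDigitLength..1 performing the same high-to-low replaces, then one final strip/split.
-- outside the precondition, e.g. on formalizeFile('x', 950): A returns ['x'], B returns ['x']
import Mathlib
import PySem

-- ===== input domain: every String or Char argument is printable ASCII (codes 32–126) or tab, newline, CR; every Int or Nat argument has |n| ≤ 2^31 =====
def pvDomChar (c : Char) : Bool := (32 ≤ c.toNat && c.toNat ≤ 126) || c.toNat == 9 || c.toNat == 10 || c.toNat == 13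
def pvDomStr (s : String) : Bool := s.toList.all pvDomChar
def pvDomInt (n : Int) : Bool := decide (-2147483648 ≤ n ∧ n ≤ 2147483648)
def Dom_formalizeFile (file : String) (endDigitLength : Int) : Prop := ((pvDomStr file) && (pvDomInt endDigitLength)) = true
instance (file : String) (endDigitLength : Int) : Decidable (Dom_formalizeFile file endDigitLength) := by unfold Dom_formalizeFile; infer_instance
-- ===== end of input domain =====

-- B replaces A's tail recursion by an explicit countdown loop over k = endDigitLength..1 (objective: simpler); same return value on all inputs with endDigitLength ≥ 1.

-- ===== PORT A =====
-- A recurses with endDigitLength-1 until it hits 1; fuel = (endDigitLength-1).toNat covers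
-- exactly that many recursive calls (the fuel-0 branch is unreachable inside Pre_).
def formalizeFileGo (file : String) (e : Int) (fuel : Nat) : List String :=
  let strGap : String := String.ofList (PySem.List.pyRepeat [' '] e)
  let file := PySem.Str.replace file strGap ","
  if e == 1 then
    (PySem.Str.split? (PySem.Str.replace file "\n" "") ",").getD []
  else
    match fuel with
    | 0 => []
    | f + 1 => formalizeFileGo file (e - 1) f
termination_by fuel

def formalizeFile (file : String) (endDigitLength : Int) : List String :=
  formalizeFileGo file endDigitLength (endDigitLength - 1).toNat

-- ===== PORT B =====
def formalizeFile_alt (file : String) (endDigitLength : Int) : List String :=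
  let file := (PySem.List.pyRange endDigitLength 0 (-1)).foldl
      (fun f k => PySem.Str.replace f (String.ofList (PySem.List.pyRepeat [' '] k)) ",") file
  (PySem.Str.split? (PySem.Str.replace file "\n" "") ",").getD []

-- ===== PRECONDITION & SPEC =====
-- Pre_ excludes endDigitLength ≤ 0, where A's recursion never terminates (it raises RecursionError or
-- MemoryError), and endDigitLength > 900, where A's recursion depth (= endDigitLength) hits CPython's
-- recursion limit (~1000) and raises RecursionError; the 900 margin leaves room for the caller's stack.
def Pre_formalizeFile (file : String) (endDigitLength : Int) : Prop := 1 ≤ endDigitLength ∧ endDigitLength ≤ 900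
instance (file : String) (endDigitLength : Int) : Decidable (Pre_formalizeFile file endDigitLength) := by unfold Pre_formalizeFile; infer_instance
def pvWitness_formalizeFile : String × Int := ("1  2 3\n4", 2)

def Spec_formalizeFile (file : String) (endDigitLength : Int) (out : List String) : Prop := out = formalizeFile_alt file endDigitLength
instance (file : String) (endDigitLength : Int) (out : List String) : Decidable (Spec_formalizeFile file endDigitLength out) := by unfold Spec_formalizeFile; infer_instance

-- ===== CLAIM (what is proved, stated in full; the proofs are below) =====
def Claim_equal_formalizeFile : Prop := ∀ (file : String) (endDigitLength : Int), Dom_formalizeFile file endDigitLength → Pre_formalizeFile file endDigitLength → Spec_formalizeFile file endDigitLength (formalizeFile file endDigitLength)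

-- ===== LEMMAS AND PROOFS =====

-- A's recursion and B's countdown fold perform the same replace sequence.
theorem formalizeFileGo_eq_alt : ∀ (fuel : Nat) (file : String) (e : Int),
    1 ≤ e → (e - 1).toNat ≤ fuel →
    formalizeFileGo file e fuel = formalizeFile_alt file e := by
  intro fuel
  induction fuel with
  | zero =>
    intro file e he hf
    have he1 : e = 1 := by omega
    subst he1
    simp [formalizeFileGo, formalizeFile_alt
      , PySem.List.pyRange_neg_one_cons (by norm_num : (0:Int) < 1)]
  | succ f ih =>
    intro file e he _
    by_cases h1 : e = 1
    · subst h1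
      simp [formalizeFileGo, formalizeFile_alt
        , PySem.List.pyRange_neg_one_cons (by norm_num : (0:Int) < 1)]
    · have he2 : 1 ≤ e - 1 := by omega
      rw [show formalizeFileGo file e (f + 1)
            = formalizeFileGo (PySem.Str.replace file (String.ofList (PySem.List.pyRepeat [' '] e)) ",") (e - 1) f from by
            simp [formalizeFileGo, h1]]
      rw [ih _ _ he2 (by omega)]
      simp [formalizeFile_alt, PySem.List.pyRange_neg_one_cons (show (0:Int) < e by omega)]

-- ===== VERDICT (by name: the statement is the Claim_ definition above) =====
theorem formalizeFile_spec : Claim_equal_formalizeFile := by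
  intro file e _ hpre
  unfold Spec_formalizeFile formalizeFile
  exact formalizeFileGo_eq_alt _ _ _ hpre.1 (le_refl _)
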